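-- pv_equiv track=rewrite | github.com/anna-tarasidou/Complex_Data_Management | Merger_Valuation_Algorithms/merger_algorithms.py | sort_merge_antisemijoin
-- ===== SOURCE A (Python) =====
-- def sort_merge_antisemijoin(r, s, r_key_index=0, s_key_index=0):
--     # Sort
--     sorted_r = sorted([row for row in r if len(row) > r_key_index], key=lambda x: str(x[r_key_index]))
--     sorted_s = sorted([row for row in s if len(row) > s_key_index], key=lambda x: str(x[s_key_index]))
--
--     result = []
--     i = 0
--     j = 0
--
--     # Merge
--     while i < len(sorted_r) and j < len(sorted_s):
--         r_key = str(sorted_r[i][r_key_index])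
--         s_key = str(sorted_s[j][s_key_index])
--
--         if r_key == s_key:
--             i += 1
--         elif r_key < s_key:
--             result.append(sorted_r[i])
--             i += 1
--         else:
--             j += 1
--
--     while i < len(sorted_r):
--         result.append(sorted_r[i])
--         i += 1
--
--     return result
-- ===== SOURCE B (Python) =====
-- def sort_merge_antisemijoin(r, s, r_key_index=0, s_key_index=0):
--     # Hash antisemijoin: build the set of s keys once; no sort of s, no merge pointers.
--     s_keys = {str(row[s_key_index]) for row in s if len(row) > s_key_index}
--     sorted_r = sorted((row for row in r if len(row) > r_key_index),
--                       key=lambda x: str(x[r_key_index]))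
--     return [row for row in sorted_r if str(row[r_key_index]) not in s_keys]
-- ===== Notes on version B (the rewrite author's own statement) =====
-- stated objective: alternative
-- what changed: A sorts both inputs and runs a two-pointer sort-merge; B never sorts s: it builds a hash set of s keys once and filters the sorted r rows by set membership.
-- outside the precondition, e.g. on sort_merge_antisemijoin([[1]], [[]], 0, -1): A raises IndexError, B raises IndexError
import Mathlib
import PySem

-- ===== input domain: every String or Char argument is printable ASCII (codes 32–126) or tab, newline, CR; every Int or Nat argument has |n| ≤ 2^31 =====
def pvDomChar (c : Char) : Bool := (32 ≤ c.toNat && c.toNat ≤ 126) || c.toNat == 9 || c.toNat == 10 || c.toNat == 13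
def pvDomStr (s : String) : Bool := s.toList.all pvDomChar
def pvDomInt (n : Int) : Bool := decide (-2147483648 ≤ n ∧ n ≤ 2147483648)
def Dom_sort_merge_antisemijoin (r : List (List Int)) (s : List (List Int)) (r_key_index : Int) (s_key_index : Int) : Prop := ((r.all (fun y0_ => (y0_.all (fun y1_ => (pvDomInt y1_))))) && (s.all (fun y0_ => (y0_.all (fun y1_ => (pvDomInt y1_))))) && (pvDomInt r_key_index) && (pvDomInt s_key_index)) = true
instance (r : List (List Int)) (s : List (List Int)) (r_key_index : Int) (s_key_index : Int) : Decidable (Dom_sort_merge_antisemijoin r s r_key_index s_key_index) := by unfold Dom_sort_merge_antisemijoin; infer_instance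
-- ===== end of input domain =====

-- B replaces A's two-pointer sort-merge by a hash antisemijoin (a set of s keys built once,
-- no sort of s, no merge indices); same return value everywhere both return.

-- ===== PORT A =====
-- str(row[idx]) — the sort/merge key; the .getD 0 default is never reached inside Pre_
def smjKeyA (idx : Int) (row : List Int) : String :=
  PySem.Int.toStr ((PySem.List.pyGet? row idx).getD 0)

-- the two while loops of A, as suffix recursion over the same (i, j) state
def smjMergeA (rk sk : List Int → String) : List (List Int) → List (List Int) → List (List Int)
  | [], _ => []
  | x :: rs, [] => x :: rs
  | x :: rs, y :: ss =>
      if rk x = sk y then smjMergeA rk sk rs (y :: ss)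
      else if rk x < sk y then x :: smjMergeA rk sk rs (y :: ss)
      else smjMergeA rk sk (x :: rs) ss
  termination_by a b => a.length + b.length

def sort_merge_antisemijoin (r : List (List Int)) (s : List (List Int)) (r_key_index : Int) (s_key_index : Int) : List (List Int) :=
  let sorted_r := PySem.List.sorted (r.filter (fun row => decide (r_key_index < (row.length : Int)))) (smjKeyA r_key_index) false
  let sorted_s := PySem.List.sorted (s.filter (fun row => decide (s_key_index < (row.length : Int)))) (smjKeyA s_key_index) false
  smjMergeA (smjKeyA r_key_index) (smjKeyA s_key_index) sorted_r sorted_s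

-- ===== PORT B =====
def smjKeyB (idx : Int) (row : List Int) : String :=
  PySem.Int.toStr ((PySem.List.pyGet? row idx).getD 0)

def sort_merge_antisemijoin_alt (r : List (List Int)) (s : List (List Int)) (r_key_index : Int) (s_key_index : Int) : List (List Int) :=
  let s_keys : PySem.Set String :=
    PySem.Set.ofList ((s.filter (fun row => decide (s_key_index < (row.length : Int)))).map (smjKeyB s_key_index))
  let sorted_r := PySem.List.sorted (r.filter (fun row => decide (r_key_index < (row.length : Int)))) (smjKeyB r_key_index) false
  sorted_r.filter (fun row => !(PySem.Set.contains s_keys (smjKeyB r_key_index row)))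

-- ===== PRECONDITION & SPEC =====
-- Pre_ excludes exactly the inputs where the Python raises IndexError: a NEGATIVE key index
-- together with a row shorter than its magnitude (such rows pass the len(row) > idx filter
-- but row[idx] wraps out of range). Both A and B raise there.
def Pre_sort_merge_antisemijoin (r : List (List Int)) (s : List (List Int)) (r_key_index : Int) (s_key_index : Int) : Prop :=
  (0 ≤ r_key_index ∨ ∀ row ∈ r, -r_key_index ≤ (row.length : Int)) ∧
  (0 ≤ s_key_index ∨ ∀ row ∈ s, -s_key_index ≤ (row.length : Int))
instance (r : List (List Int)) (s : List (List Int)) (r_key_index : Int) (s_key_index : Int) : Decidable (Pre_sort_merge_antisemijoin r s r_key_index s_key_index) := by unfold Pre_sort_merge_antisemijoin; infer_instance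

def pvWitness_sort_merge_antisemijoin : List (List Int) × List (List Int) × Int × Int :=
  ([[2, 7], [1], [3]], [[1, 9], [5]], 0, 0)

def Spec_sort_merge_antisemijoin (r : List (List Int)) (s : List (List Int)) (r_key_index : Int) (s_key_index : Int) (out : List (List Int)) : Prop := out = sort_merge_antisemijoin_alt r s r_key_index s_key_index
instance (r : List (List Int)) (s : List (List Int)) (r_key_index : Int) (s_key_index : Int) (out : List (List Int)) : Decidable (Spec_sort_merge_antisemijoin r s r_key_index s_key_index out) := by unfold Spec_sort_merge_antisemijoin; infer_instance

-- ===== CLAIM (what is proved, stated in full; the proofs are below) =====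
def Claim_equal_sort_merge_antisemijoin : Prop := ∀ (r : List (List Int)) (s : List (List Int)) (r_key_index : Int) (s_key_index : Int), Dom_sort_merge_antisemijoin r s r_key_index s_key_index → Pre_sort_merge_antisemijoin r s r_key_index s_key_index → Spec_sort_merge_antisemijoin r s r_key_index s_key_index (sort_merge_antisemijoin r s r_key_index s_key_index)

-- ===== LEMMAS AND PROOFS =====

-- On key-sorted inputs, the two-pointer merge keeps exactly the left rows whose key
-- matches no right row's key, in left order.
theorem smjMergeA_eq_filter (rk sk : List Int → String) (n : Nat) :
    ∀ (A B : List (List Int)), A.length + B.length ≤ n →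
      A.Pairwise (fun a b => rk a ≤ rk b) → B.Pairwise (fun a b => sk a ≤ sk b) →
      smjMergeA rk sk A B = A.filter (fun x => !(B.any (fun y => sk y == rk x))) := by
  induction n with
  | zero =>
      intro A B hlen _ _
      have hA : A = [] := by cases A <;> simp_all
      subst hA; simp [smjMergeA]
  | succ n ih =>
      intro A B hlen hA hB
      match A, B with
      | [], B => simp [smjMergeA]
      | x :: rs, [] => simp [smjMergeA]
      | x :: rs, y :: ss =>
          simp only [List.length_cons] at hlen
          have hrs : rs.Pairwise (fun a b => rk a ≤ rk b) := (List.pairwise_cons.mp hA).2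
          have hxle : ∀ a ∈ rs, rk x ≤ rk a := (List.pairwise_cons.mp hA).1
          have hss : ss.Pairwise (fun a b => sk a ≤ sk b) := (List.pairwise_cons.mp hB).2
          have hyle : ∀ b ∈ ss, sk y ≤ sk b := (List.pairwise_cons.mp hB).1
          by_cases h1 : rk x = sk y
          · have hm : smjMergeA rk sk (x :: rs) (y :: ss) = smjMergeA rk sk rs (y :: ss) := by
              simp [smjMergeA, h1]
            rw [hm, ih rs (y :: ss) (by simp; omega) hrs hB]
            have hpx : ¬ ((!((y :: ss).any (fun y' => sk y' == rk x))) = true) := by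
              simp [List.any_cons, h1]
            rw [List.filter_cons, if_neg hpx]
          · by_cases h2 : rk x < sk y
            · have hm : smjMergeA rk sk (x :: rs) (y :: ss) = x :: smjMergeA rk sk rs (y :: ss) := by
                simp [smjMergeA, h1, h2]
              rw [hm, ih rs (y :: ss) (by simp; omega) hrs hB]
              have hpx : (!((y :: ss).any (fun y' => sk y' == rk x))) = true := by
                simp only [Bool.not_eq_true', List.any_eq_false]
                intro z hz
                rcases List.mem_cons.mp hz with rfl | hz'
                · simp; exact fun h => h1 (h.symm)
                · have : rk x < sk z := lt_of_lt_of_le h2 (hyle z hz')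
                  simp; exact fun h => absurd h.symm (ne_of_lt this)
              rw [List.filter_cons, if_pos hpx]
            · have h3 : sk y < rk x := lt_of_le_of_ne (le_of_not_gt h2) (fun h => h1 h.symm)
              have hm : smjMergeA rk sk (x :: rs) (y :: ss) = smjMergeA rk sk (x :: rs) ss := by
                simp [smjMergeA, h1, h2]
              rw [hm, ih (x :: rs) ss (by simp; omega) hA hss]
              apply List.filter_congr
              intro a ha
              have hya : sk y ≠ rk a := by
                have : sk y < rk a := by
                  rcases List.mem_cons.mp ha with rfl | ha'
                  · exact h3
                  · exact lt_of_lt_of_le h3 (hxle a ha')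
                exact ne_of_lt this
              simp [List.any_cons, hya]

theorem sort_merge_antisemijoin_eq (r s : List (List Int)) (ri si : Int) :
    sort_merge_antisemijoin r s ri si = sort_merge_antisemijoin_alt r s ri si := by
  unfold sort_merge_antisemijoin sort_merge_antisemijoin_alt
  simp only [smjKeyB]
  rw [smjMergeA_eq_filter (smjKeyA ri) (smjKeyA si)
        ((PySem.List.sorted (r.filter (fun row => decide (ri < (row.length : Int)))) (smjKeyA ri) false).length
          + (PySem.List.sorted (s.filter (fun row => decide (si < (row.length : Int)))) (smjKeyA si) false).length)
        _ _ le_rfl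
        (PySem.List.sorted_pairwise _ (smjKeyA ri)) (PySem.List.sorted_pairwise _ (smjKeyA si))]
  apply List.filter_congr
  intro a _
  congr 1
  rw [Bool.eq_iff_iff]
  simp only [List.any_eq_true, beq_iff_eq, PySem.Set.contains_iff, PySem.Set.mem_ofList,
    List.mem_map, PySem.List.mem_sorted, smjKeyA, smjKeyB]

-- ===== VERDICT (by name: the statement is the Claim_ definition above) =====
theorem sort_merge_antisemijoin_spec : Claim_equal_sort_merge_antisemijoin := by
  intro r s ri si _ _
  unfold Spec_sort_merge_antisemijoin
  exact sort_merge_antisemijoin_eq r s ri si
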